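-- pv_equiv track=rewrite | github.com/u6684258/instance-generator | src/instance_generator/asp_translator.py | translate_to_asp_predicate
-- ===== SOURCE A (Python) =====
-- def replace_special_symbols(string: str):
--     # symbols '@' and '-' are replaced with '_AT_' and '_DASH_', respectively
--     output = string
--     for replacement in [('@', '_AT_'), ('-', '_DASH_')]:
--         output = output.replace(*replacement)
--     return output
--
-- def get_forbidden_symbols(string: str):
--     # clingo allows the following symbols for constants and variables: [A-Za-z0-9_’]
--     allowed_symbols = [chr(c) for c in range(ord('a'), ord('z')+1)] + [chr(c)
--             for c in range(ord('A'), ord('Z')+1)] + [str(n) for n in range(10)] + ['_', '’']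
--     return [sym for sym in string if sym not in allowed_symbols]
--
-- def get_index_of_first_non_underscore(string: str):
--     for i in range(len(string)):
--         if string[i] != '_':
--             return i
--     return None
--
-- def translate_to_asp_predicate(pddl_predicate_name: str):
--     asp_predicate = pddl_predicate_name.lower()
--       # Predicates in clingo must start with a lower case letter. We transform
--       # the entire predicate to lower case so that "pred", "PRED" and "Pred"
--       # (identical predicates in PDDL) are mapped to the same transformed
--       # string.
--
--     # The Fast Downward parser adds the prefix "type@" internally if a type is
--     # used as a predicate. For the translation to ASP we need to undo this
--     # treatment.
--     if asp_predicate.startswith("type@"):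
--         asp_predicate = asp_predicate.replace("type@", "", 1)
--
--     # replace symbols '@' and '-' (these two are treated explicitly because the
--     # Fast Downward parser allows / adds them)
--     forbidden_symbols = get_forbidden_symbols(asp_predicate)
--     if '@' in forbidden_symbols or '-' in forbidden_symbols:
--         asp_predicate = replace_special_symbols(asp_predicate)
--         forbidden_symbols = [sym for sym in forbidden_symbols if sym not in ['@',
--             '-']]
--     assert(len(forbidden_symbols) == 0)
--
--     # check if first character, potentially after a sequence of underscores
--     # '_', is a letter, if not add prefix 'pred_'
--     first_non_underscore = get_index_of_first_non_underscore(asp_predicate)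
--     if first_non_underscore is None or not asp_predicate[first_non_underscore].isalpha():
--         asp_predicate = "pred_" + asp_predicate
--
--     return asp_predicate
-- ===== SOURCE B (Python) =====
-- def translate_to_asp_predicate(pddl_predicate_name: str):
--     # One pass: build the ASP name and collect bad characters, then one
--     # library-based leading-character check.
--     asp = pddl_predicate_name.lower()
--     if asp.startswith("type@"):
--         asp = asp[5:]
--     out = []
--     bad = []
--     for ch in asp:
--         if ch == '@':
--             out.append('_AT_')
--         elif ch == '-':
--             out.append('_DASH_')
--         elif ch.isalnum() or ch in '_\u2019':
--             out.append(ch)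
--         else:
--             bad.append(ch)
--     assert not bad
--     res = ''.join(out)
--     stripped = res.lstrip('_')
--     if not stripped or not stripped[0].isalpha():
--         res = 'pred_' + res
--     return res
-- ===== Notes on version B (the rewrite author's own statement) =====
-- stated objective: simpler
-- what changed: A's separate forbidden-symbol scan (against a 64-element allowed list), two whole-string replace passes and an index-hunting loop are merged into one build-and-validate pass over the characters plus a library lstrip-based leading-character check.
import Mathlib
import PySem

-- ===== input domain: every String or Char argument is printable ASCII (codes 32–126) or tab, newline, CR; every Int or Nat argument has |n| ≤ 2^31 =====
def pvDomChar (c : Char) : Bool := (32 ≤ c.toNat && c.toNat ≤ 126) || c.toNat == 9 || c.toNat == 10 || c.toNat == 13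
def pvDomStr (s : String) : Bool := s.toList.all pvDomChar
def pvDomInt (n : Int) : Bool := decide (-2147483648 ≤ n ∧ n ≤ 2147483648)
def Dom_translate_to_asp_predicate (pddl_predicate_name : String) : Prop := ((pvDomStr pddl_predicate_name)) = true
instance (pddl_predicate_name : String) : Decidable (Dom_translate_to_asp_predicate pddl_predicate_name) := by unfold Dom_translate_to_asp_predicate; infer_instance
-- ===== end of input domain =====

-- B merges A's separate forbidden-symbol scan, two replace passes and index loop into one
-- build/validate pass plus a library-based leading-character check (objective: simpler).

-- ===== PORT A =====

-- hand port of str.replace(old, new, 1): exact for nonempty old (here old = "type@")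
def pvReplace1 (s old new : List Char) : List Char :=
  match s with
  | [] => []
  | c :: t => if old.isPrefixOf (c :: t) then new ++ (c :: t).drop old.length
              else c :: pvReplace1 t old new

-- replace_special_symbols
def pvReplaceSpecialSymbols (s : List Char) : List Char :=
  [('@', "_AT_".toList), ('-', "_DASH_".toList)].foldl
    (fun out r => PySem.Chars.replace out [r.1] r.2) s

-- get_forbidden_symbols (allowed list built exactly as in A; str(n) is the digit char)
def pvAllowedSymbols : List Char :=
  ((PySem.List.pyRange 97 (122 + 1) 1).map (fun n => Char.ofNat n.toNat)) ++
  ((PySem.List.pyRange 65 (90 + 1) 1).map (fun n => Char.ofNat n.toNat)) ++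
  ((PySem.List.pyRange 0 10 1).map (fun n => Char.ofNat (48 + n.toNat))) ++ ['_', '’']

def pvGetForbiddenSymbols (s : List Char) : List Char :=
  s.filter (fun c => !(pvAllowedSymbols.contains c))

-- get_index_of_first_non_underscore (the range(len) loop, index carried explicitly)
def pvFirstNonUnderscore : List Char → Int → Option Int
  | [], _ => none
  | c :: t, i => if c ≠ '_' then some i else pvFirstNonUnderscore t (i + 1)

def translate_to_asp_predicate (pddl_predicate_name : String) : String :=
  let asp0 := PySem.Chars.lower pddl_predicate_name.toList
  let asp1 := if PySem.Chars.startswith asp0 "type@".toList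
              then pvReplace1 asp0 "type@".toList [] else asp0
  let forb := pvGetForbiddenSymbols asp1
  let asp2 := if forb.contains '@' || forb.contains '-' then pvReplaceSpecialSymbols asp1 else asp1
  -- Python then asserts the remaining forbidden list is empty: Pre_ excludes the AssertionError inputs
  let needPrefix := match pvFirstNonUnderscore asp2 0 with
    | none => true
    | some i => !(PySem.Chars.isalpha (PySem.List.pyGetD asp2 i ' '))
  String.ofList (if needPrefix then "pred_".toList ++ asp2 else asp2)

-- ===== PORT B =====

-- the loop body of Source B: build out, collect bad
def pvStep (acc : List Char × List Char) (ch : Char) : List Char × List Char :=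
  if ch = '@' then (acc.1 ++ "_AT_".toList, acc.2)
  else if ch = '-' then (acc.1 ++ "_DASH_".toList, acc.2)
  else if PySem.Chars.isalnum ch || ch = '_' || ch = '’' then (acc.1 ++ [ch], acc.2)
  else (acc.1, acc.2 ++ [ch])

def translate_to_asp_predicate_alt (pddl_predicate_name : String) : String :=
  let asp0 := PySem.Chars.lower pddl_predicate_name.toList
  let asp := if PySem.Chars.startswith asp0 "type@".toList then asp0.drop 5 else asp0
  let ob := asp.foldl pvStep ([], [])
  -- assert not bad: Pre_ excludes the AssertionError inputs
  let res := ob.1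
  let stripped := res.dropWhile (fun c => c == '_')   -- res.lstrip('_'), exact for one strip char
  String.ofList (if stripped.isEmpty || !(PySem.Chars.isalpha (stripped.headD ' '))
                 then "pred_".toList ++ res else res)

-- ===== PRECONDITION & SPEC =====

-- Pre_ excludes exactly the inputs on which A's assert fails (AssertionError): some character
-- of the lowercased name is not alphanumeric, '_', '@' or '-' ('’' cannot occur inside Dom_).
def Pre_translate_to_asp_predicate (pddl_predicate_name : String) : Prop :=
  (PySem.Chars.lower pddl_predicate_name.toList).all
    (fun c => PySem.Chars.isalnum c || c == '_' || c == '@' || c == '-') = true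

instance (pddl_predicate_name : String) : Decidable (Pre_translate_to_asp_predicate pddl_predicate_name) := by
  unfold Pre_translate_to_asp_predicate; infer_instance

def pvWitness_translate_to_asp_predicate : String := "Type@Pred-__1"

def Spec_translate_to_asp_predicate (pddl_predicate_name : String) (out : String) : Prop :=
  out = translate_to_asp_predicate_alt pddl_predicate_name
instance (pddl_predicate_name : String) (out : String) : Decidable (Spec_translate_to_asp_predicate pddl_predicate_name out) := by
  unfold Spec_translate_to_asp_predicate; infer_instance

-- ===== CLAIM (what is proved, stated in full; the proofs are below) =====
def Claim_equal_translate_to_asp_predicate : Prop := ∀ (pddl_predicate_name : String), Dom_translate_to_asp_predicate pddl_predicate_name → Pre_translate_to_asp_predicate pddl_predicate_name → Spec_translate_to_asp_predicate pddl_predicate_name (translate_to_asp_predicate pddl_predicate_name)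

-- ===== LEMMAS AND PROOFS =====

-- the per-character output both programs produce
def pvCharOut (c : Char) : List Char :=
  if c = '@' then "_AT_".toList else if c = '-' then "_DASH_".toList else [c]

def pvOkChar (c : Char) : Bool :=
  PySem.Chars.isalnum c || c == '_' || c == '@' || c == '-'

theorem pvReplace_go_single (c : Char) (new : List Char) :
    ∀ (fuel : Nat) (l acc : List Char), l.length ≤ fuel →
      PySem.Chars.replace.go [c] new fuel l acc =
        acc.reverse ++ l.flatMap (fun x => if x = c then new else [x]) := by
  intro fuel
  induction fuel with
  | zero =>
    intro l acc h
    have : l = [] := List.eq_nil_of_length_eq_zero (Nat.le_zero.mp h)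
    subst this
    simp [PySem.Chars.replace.go]
  | succ n ih =>
    intro l acc h
    cases l with
    | nil => simp [PySem.Chars.replace.go]
    | cons d t =>
      simp only [PySem.Chars.replace.go]
      by_cases hd : c = d
      · subst hd
        have hpre : [c].isPrefixOf (c :: t) = true := by simp [List.isPrefixOf]
        simp only [hpre, if_pos]
        rw [ih _ _ (by simpa using Nat.le_of_succ_le_succ h)]
        simp
      · have hpre : [c].isPrefixOf (d :: t) = false := by
          simp [List.isPrefixOf]
          exact fun hh => hd hh
        simp only [hpre, Bool.false_eq_true, if_false]
        rw [ih _ _ (by simpa using Nat.le_of_succ_le_succ h)]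
        simp [Ne.symm hd]

theorem pvReplace_single (s : List Char) (c : Char) (new : List Char) :
    PySem.Chars.replace s [c] new = s.flatMap (fun x => if x = c then new else [x]) := by
  have : ([c] : List Char).isEmpty = false := rfl
  simp only [PySem.Chars.replace, this, Bool.false_eq_true, if_false]
  simpa using pvReplace_go_single c new s.length s [] (le_refl _)

theorem pvReplaceSpecial_eq (s : List Char) :
    pvReplaceSpecialSymbols s = s.flatMap pvCharOut := by
  simp only [pvReplaceSpecialSymbols, List.foldl_cons, List.foldl_nil]
  rw [pvReplace_single, pvReplace_single, List.flatMap_assoc]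
  have hfun : (fun c => (if c = '@' then "_AT_".toList else [c]).flatMap
      (fun x => if x = '-' then "_DASH_".toList else [x])) = pvCharOut := by
    funext c
    by_cases h1 : c = '@'
    · subst h1; decide
    · simp [h1, pvCharOut]
  rw [hfun]

theorem pvFold_eq (t : List Char) (ht : ∀ c ∈ t, pvOkChar c = true) (o b : List Char) :
    t.foldl pvStep (o, b) = (o ++ t.flatMap pvCharOut, b) := by
  induction t generalizing o with
  | nil => simp
  | cons c rest ih =>
    have hc : pvOkChar c = true := ht c (by simp)
    have hr : ∀ x ∈ rest, pvOkChar x = true := fun x hx => ht x (by simp [hx])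
    by_cases h1 : c = '@'
    · subst h1; simp [pvStep, pvCharOut, ih hr]
    · by_cases h2 : c = '-'
      · subst h2; simp [pvStep, pvCharOut, ih hr]
      · have h3 : (PySem.Chars.isalnum c || c = '_' || c = '’') = true := by
          simp only [pvOkChar] at hc
          simp_all
        simp [pvStep, h1, h2, h3, pvCharOut, ih hr]

theorem pvFlatMap_id (t : List Char) (h : ∀ c ∈ t, c ≠ '@' ∧ c ≠ '-') :
    t.flatMap pvCharOut = t := by
  induction t with
  | nil => rfl
  | cons c rest ih =>
    have hc := h c (by simp)
    simp [pvCharOut, hc.1, hc.2, ih (fun x hx => h x (by simp [hx]))]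

theorem pvForb_mem (t : List Char) (c : Char) (hc : pvAllowedSymbols.contains c = false) :
    c ∈ pvGetForbiddenSymbols t ↔ c ∈ t := by
  simp only [pvGetForbiddenSymbols, List.mem_filter, Bool.not_eq_eq_eq_not, Bool.not_true]
  refine ⟨fun h => h.1, fun h => ⟨h, ?_⟩⟩
  simpa using hc

-- A's branch condition equals "u still contains '@' or '-'", and in either case
-- the selected value is the per-character expansion of u.
theorem pvA_core (u : List Char) :
    (if (pvGetForbiddenSymbols u).contains '@' || (pvGetForbiddenSymbols u).contains '-'
     then pvReplaceSpecialSymbols u else u) = u.flatMap pvCharOut := by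
  by_cases h : ((pvGetForbiddenSymbols u).contains '@' || (pvGetForbiddenSymbols u).contains '-') = true
  · rw [if_pos h]; exact pvReplaceSpecial_eq u
  · rw [if_neg (by simpa using h)]
    rw [Bool.or_eq_true, List.contains_iff_mem, List.contains_iff_mem] at h
    rw [not_or] at h
    rw [pvForb_mem u '@' (by decide), pvForb_mem u '-' (by decide)] at h
    exact (pvFlatMap_id u (fun c hcu => ⟨fun e => h.1 (e ▸ hcu), fun e => h.2 (e ▸ hcu)⟩)).symm

theorem pvReplace1_prefix (t : List Char) (h : PySem.Chars.startswith t "type@".toList = true) :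
    pvReplace1 t "type@".toList [] = t.drop 5 := by
  cases t with
  | nil => exact absurd h (by decide)
  | cons c rest =>
    simp only [PySem.Chars.startswith] at h
    simp only [pvReplace1, h, if_true, List.nil_append]
    rfl

theorem pvFNU_shift (u : List Char) (i : Int) :
    pvFirstNonUnderscore u i = (pvFirstNonUnderscore u 0).map (· + i) := by
  induction u generalizing i with
  | nil => rfl
  | cons c rest ih =>
    by_cases h : c = '_'
    · subst h
      simp only [pvFirstNonUnderscore, ne_eq, not_true_eq_false, if_false]
      rw [ih (i + 1), ih (0 + 1)]
      cases pvFirstNonUnderscore rest 0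
      · simp
      · simp; ring
    · simp [pvFirstNonUnderscore, h]

theorem pvFNU_spec (u : List Char) (k : Int) (h : pvFirstNonUnderscore u 0 = some k) :
    0 ≤ k ∧ k < u.length := by
  induction u generalizing k with
  | nil => simp [pvFirstNonUnderscore] at h
  | cons c rest ih =>
    by_cases hc : c = '_'
    · subst hc
      simp only [pvFirstNonUnderscore, ne_eq, not_true_eq_false, reduceIte] at h
      rw [pvFNU_shift] at h
      cases hr : pvFirstNonUnderscore rest 0 with
      | none => rw [hr] at h; simp at h
      | some j =>
        rw [hr] at h
        simp only [Option.map_some, Option.some.injEq] at h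
        obtain ⟨h1, h2⟩ := ih j hr
        simp only [List.length_cons]
        push_cast
        omega
    · simp [pvFirstNonUnderscore, hc] at h
      subst h
      simp

theorem pvCond_eq (u : List Char) :
    (match pvFirstNonUnderscore u 0 with
      | none => true
      | some i => !(PySem.Chars.isalpha (PySem.List.pyGetD u i ' '))) =
    ((u.dropWhile (fun c => c == '_')).isEmpty ||
      !(PySem.Chars.isalpha ((u.dropWhile (fun c => c == '_')).headD ' '))) := by
  induction u with
  | nil => rfl
  | cons c rest ih =>
    by_cases hc : c = '_'
    · subst hc
      have hstep : pvFirstNonUnderscore ('_' :: rest) 0 = (pvFirstNonUnderscore rest 0).map (· + (0 + 1)) := by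
        simp only [pvFirstNonUnderscore, ne_eq, not_true_eq_false, reduceIte]
        exact pvFNU_shift rest (0 + 1)
      rw [hstep]
      have hd : (('_' :: rest).dropWhile (fun c => c == '_')) = rest.dropWhile (fun c => c == '_') := by
        simp [List.dropWhile]
      rw [hd]
      cases hr : pvFirstNonUnderscore rest 0 with
      | none => rw [hr] at ih; simpa using ih
      | some k =>
        obtain ⟨hk0, hklen⟩ := pvFNU_spec rest k hr
        rw [hr] at ih
        simp only [Option.map_some]
        have hget : PySem.List.pyGetD ('_' :: rest) (k + (0 + 1)) ' ' = PySem.List.pyGetD rest k ' ' := by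
          rw [PySem.List.pyGetD_of_nonneg _ _ (by omega), PySem.List.pyGetD_of_nonneg _ _ hk0]
          have hnat : (k + 1).toNat = k.toNat + 1 := by omega
          simp [hnat]
        rw [hget]
        exact ih
    · have hcb : (c == '_') = false := by simpa using hc
      simp [pvFirstNonUnderscore, hc, hcb, List.dropWhile, PySem.List.pyGetD_zero_cons]

-- ===== VERDICT (by name: the statement is the Claim_ definition above) =====
theorem translate_to_asp_predicate_spec : Claim_equal_translate_to_asp_predicate := by
  intro p hdom hpre
  unfold Spec_translate_to_asp_predicate
  unfold Pre_translate_to_asp_predicate at hpre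
  simp only [translate_to_asp_predicate, translate_to_asp_predicate_alt]
  rw [List.all_eq_true] at hpre
  by_cases hs : PySem.Chars.startswith (PySem.Chars.lower p.toList) "type@".toList = true
  · rw [if_pos hs, if_pos hs, pvReplace1_prefix _ hs]
    have hu : ∀ c ∈ (PySem.Chars.lower p.toList).drop 5, pvOkChar c = true :=
      fun c hc => by simpa [pvOkChar] using hpre c (List.mem_of_mem_drop hc)
    rw [pvA_core, pvFold_eq _ hu, pvCond_eq]
    simp
  · rw [if_neg hs, if_neg hs]
    have hu : ∀ c ∈ PySem.Chars.lower p.toList, pvOkChar c = true :=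
      fun c hc => by simpa [pvOkChar] using hpre c hc
    rw [pvA_core, pvFold_eq _ hu, pvCond_eq]
    simp
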